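-- pv_equiv track=rewrite | github.com/leetsolution/solutions | problems/3529-count-cells-in-overlapping-horizontal-and-vertical-substrings/solution.py | countCells
-- ===== SOURCE A (Python) =====
-- from typing import List
--
-- def countCells(grid: List[List[str]], pattern: str) -> int:
--     m = len(grid)
--     n = len(grid[0])
--     p_len = len(pattern)
--     horz_matches = set()
--     vert_matches = set()
--     count = 0
--
--     for r in range(m):
--         for c in range(n):
--             # Check horizontal
--             horz_str = ""
--             curr_r = r
--             curr_c = c
--             for _ in range(p_len):
--                 horz_str += grid[curr_r][curr_c]
--                 curr_c += 1
--                 if curr_c == n: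
--                     curr_c = 0
--                     curr_r += 1
--                     if curr_r == m:
--                         break
--
--             if len(horz_str) == p_len and horz_str == pattern:
--                 curr_r = r
--                 curr_c = c
--                 for _ in range(p_len):
--                     horz_matches.add((curr_r, curr_c))
--                     curr_c += 1
--                     if curr_c == n:
--                         curr_c = 0
--                         curr_r += 1
--
--     for c in range(n):
--         for r in range(m):
--             # Check vertical
--             vert_str = ""
--             curr_r = r
--             curr_c = c
--             for _ in range(p_len):
--                 vert_str += grid[curr_r][curr_c]
--                 curr_r += 1
--                 if curr_r == m:
--                     curr_r = 0
--                     curr_c += 1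
--                     if curr_c == n:
--                         break
--
--             if len(vert_str) == p_len and vert_str == pattern:
--                 curr_r = r
--                 curr_c = c
--                 for _ in range(p_len):
--                     vert_matches.add((curr_r, curr_c))
--                     curr_r += 1
--                     if curr_r == m:
--                         curr_r = 0
--                         curr_c += 1
--
--     for cell in horz_matches:
--         if cell in vert_matches:
--             count += 1
--
--     return count
-- ===== SOURCE B (Python) =====
-- from typing import List
--
-- def countCells(grid: List[List[str]], pattern: str) -> int:
--     m, n, p = len(grid), len(grid[0]), len(pattern)
--     if n == 0 or p == 0:
--         return 0
--     cells = [grid[r][c] for r in range(m) for c in range(n)]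
--     cellsT = [grid[r][c] for c in range(n) for r in range(m)]
--     N = m * n
--     h = set()
--     for k in range(N):
--         if "".join(cells[k:k + p]) == pattern:
--             h.update(divmod(k + t, n) for t in range(p))
--     v = set()
--     for k in range(N):
--         if "".join(cellsT[k:k + p]) == pattern:
--             v.update((j % m, j // m) for j in range(k, k + p))
--     return len(h & v)
-- ===== Notes on version B (the rewrite author's own statement) =====
-- stated objective: simpler
-- what changed: B replaces A's per-cell wrap-around coordinate walking and duplicated scan/mark loops by flattening the grid once in row-major and once in column-major order, testing each start index with a single join-of-slice comparison, marking covered cells via divmod, and returning the size of the intersection of the two coordinate sets.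
import Mathlib
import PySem

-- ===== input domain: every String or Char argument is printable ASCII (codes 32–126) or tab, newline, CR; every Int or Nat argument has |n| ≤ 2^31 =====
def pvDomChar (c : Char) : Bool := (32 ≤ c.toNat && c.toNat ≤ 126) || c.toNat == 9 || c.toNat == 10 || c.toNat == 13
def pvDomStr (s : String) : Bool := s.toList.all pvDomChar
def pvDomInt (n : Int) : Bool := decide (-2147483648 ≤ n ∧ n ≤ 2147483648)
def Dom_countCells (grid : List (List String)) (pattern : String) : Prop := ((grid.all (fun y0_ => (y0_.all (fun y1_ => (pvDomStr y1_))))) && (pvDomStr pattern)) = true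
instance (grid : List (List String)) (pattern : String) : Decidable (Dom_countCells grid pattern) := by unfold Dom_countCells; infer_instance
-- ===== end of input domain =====

-- B replaces A's per-cell wrap-around walking by one row-major and one column-major
-- flattening of the grid, slice-and-join comparisons and a set intersection (objective: simpler).

-- ===== PORT A =====
-- the inner 'for _ in range(p_len)' loop building horz_str (with its wrap and break)
def hScanA (grid : List (List String)) (m n : Int) : Nat → String → Int → Int → String
  | 0, s, _, _ => s
  | fuel+1, s, cr, cc =>
    let s' := s ++ PySem.List.pyGetD (PySem.List.pyGetD grid cr []) cc ""
    if cc + 1 = n then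
      if cr + 1 = m then s'
      else hScanA grid m n fuel s' (cr + 1) 0
    else hScanA grid m n fuel s' cr (cc + 1)

-- the loop adding p_len wrapped coordinates to horz_matches
def hMarkA (n : Int) : Nat → PySem.Set (Int × Int) → Int → Int → PySem.Set (Int × Int)
  | 0, st, _, _ => st
  | fuel+1, st, cr, cc =>
    let st' := st.add (cr, cc)
    if cc + 1 = n then hMarkA n fuel st' (cr + 1) 0
    else hMarkA n fuel st' cr (cc + 1)

-- the inner loop building vert_str (with its wrap and break)
def vScanA (grid : List (List String)) (m n : Int) : Nat → String → Int → Int → String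
  | 0, s, _, _ => s
  | fuel+1, s, cr, cc =>
    let s' := s ++ PySem.List.pyGetD (PySem.List.pyGetD grid cr []) cc ""
    if cr + 1 = m then
      if cc + 1 = n then s'
      else vScanA grid m n fuel s' 0 (cc + 1)
    else vScanA grid m n fuel s' (cr + 1) cc

-- the loop adding p_len wrapped coordinates to vert_matches
def vMarkA (m : Int) : Nat → PySem.Set (Int × Int) → Int → Int → PySem.Set (Int × Int)
  | 0, st, _, _ => st
  | fuel+1, st, cr, cc =>
    let st' := st.add (cr, cc)
    if cr + 1 = m then vMarkA m fuel st' 0 (cc + 1)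
    else vMarkA m fuel st' (cr + 1) cc

def countCells (grid : List (List String)) (pattern : String) : Int :=
  let m : Int := grid.length
  let n : Int := (PySem.List.pyGetD grid 0 []).length
  let pLen : Int := PySem.Str.len pattern
  let horz : PySem.Set (Int × Int) :=
    (PySem.List.pyRange 0 m 1).foldl (fun hs r =>
      (PySem.List.pyRange 0 n 1).foldl (fun hs c =>
        let s := hScanA grid m n pLen.toNat "" r c
        if PySem.Str.len s = pLen ∧ s = pattern then hMarkA n pLen.toNat hs r c else hs) hs)
      PySem.Set.empty
  let vert : PySem.Set (Int × Int) :=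
    (PySem.List.pyRange 0 n 1).foldl (fun vs c =>
      (PySem.List.pyRange 0 m 1).foldl (fun vs r =>
        let s := vScanA grid m n pLen.toNat "" r c
        if PySem.Str.len s = pLen ∧ s = pattern then vMarkA m pLen.toNat vs r c else vs) vs)
      PySem.Set.empty
  horz.foldl (fun cnt cell => if PySem.Set.contains vert cell then cnt + 1 else cnt) 0

-- ===== PORT B =====
def countCells_alt (grid : List (List String)) (pattern : String) : Int :=
  let m : Int := grid.length
  let n : Int := (PySem.List.pyGetD grid 0 []).length
  let p : Int := PySem.Str.len pattern
  if n = 0 ∨ p = 0 then 0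
  else
    let cells : List String :=
      (PySem.List.pyRange 0 m 1).flatMap (fun r =>
        (PySem.List.pyRange 0 n 1).map (fun c => PySem.List.pyGetD (PySem.List.pyGetD grid r []) c ""))
    let cellsT : List String :=
      (PySem.List.pyRange 0 n 1).flatMap (fun c =>
        (PySem.List.pyRange 0 m 1).map (fun r => PySem.List.pyGetD (PySem.List.pyGetD grid r []) c ""))
    let N : Int := m * n
    let h : PySem.Set (Int × Int) :=
      (PySem.List.pyRange 0 N 1).foldl (fun h k =>
        if PySem.Str.join "" (PySem.List.slice cells (some k) (some (k + p))) = pattern then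
          h.update ((PySem.List.pyRange 0 p 1).map (fun t =>
            (PySem.Int.floordiv (k + t) n, PySem.Int.mod (k + t) n)))
        else h) PySem.Set.empty
    let v : PySem.Set (Int × Int) :=
      (PySem.List.pyRange 0 N 1).foldl (fun v k =>
        if PySem.Str.join "" (PySem.List.slice cellsT (some k) (some (k + p))) = pattern then
          v.update ((PySem.List.pyRange k (k + p) 1).map (fun j =>
            (PySem.Int.mod j m, PySem.Int.floordiv j m)))
        else v) PySem.Set.empty
    PySem.Set.len (PySem.Set.inter h v)

-- ===== PRECONDITION & SPEC =====
-- Pre_ excludes exactly the inputs where the Python A raises: grid == [] (grid[0] IndexError),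
-- and, for a non-empty pattern, a row shorter than row 0 (grid[r][c] IndexError).
def Pre_countCells (grid : List (List String)) (pattern : String) : Prop :=
  grid ≠ [] ∧ (pattern ≠ "" → ∀ row ∈ grid, (grid.headD []).length ≤ row.length)
instance (grid : List (List String)) (pattern : String) : Decidable (Pre_countCells grid pattern) := by
  unfold Pre_countCells; infer_instance

def pvWitness_countCells : List (List String) × String := ([["a", "b"], ["a", "b"]], "ab")

def Spec_countCells (grid : List (List String)) (pattern : String) (out : Int) : Prop := out = countCells_alt grid pattern
instance (grid : List (List String)) (pattern : String) (out : Int) : Decidable (Spec_countCells grid pattern out) := by unfold Spec_countCells; infer_instance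

-- ===== CLAIM (what is proved, stated in full; the proofs are below) =====
def Claim_equal_countCells : Prop := ∀ (grid : List (List String)) (pattern : String), Dom_countCells grid pattern → Pre_countCells grid pattern → Spec_countCells grid pattern (countCells grid pattern)

-- ===== LEMMAS AND PROOFS =====

-- the row-major and column-major flattened cell lists, in getD form
def pvCells (grid : List (List String)) (mN nN : Nat) : List String :=
  ((List.range mN).map (fun r => (List.range nN).map (fun c => (grid.getD r []).getD c ""))).flatten

def pvCellsT (grid : List (List String)) (mN nN : Nat) : List String :=
  ((List.range nN).map (fun c => (List.range mN).map (fun r => (grid.getD r []).getD c ""))).flatten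

-- canonical form both ports' horizontal / vertical match sets are rewritten to
def pvHset (grid : List (List String)) (pattern : String) (mN nN pN : Nat) : PySem.Set (Int × Int) :=
  (List.range (mN * nN)).foldl (fun s k =>
    if PySem.Str.join "" (((pvCells grid mN nN).drop k).take pN) = pattern then
      s.update ((List.range pN).map (fun t => ((((k + t) / nN : Nat) : Int), (((k + t) % nN : Nat) : Int))))
    else s) PySem.Set.empty

def pvVset (grid : List (List String)) (pattern : String) (mN nN pN : Nat) : PySem.Set (Int × Int) :=
  (List.range (nN * mN)).foldl (fun s k =>
    if PySem.Str.join "" (((pvCellsT grid mN nN).drop k).take pN) = pattern then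
      s.update ((List.range pN).map (fun t => ((((k + t) % mN : Nat) : Int), (((k + t) / mN : Nat) : Int))))
    else s) PySem.Set.empty

lemma pv_join_nil : PySem.Str.join "" ([] : List String) = "" := by
  rfl

lemma pv_join_cons (c : String) (l : List String) :
    PySem.Str.join "" (c :: l) = c ++ PySem.Str.join "" l := by
  cases l with
  | nil => simp [PySem.Str.join, PySem.Chars.join, List.intercalate]
  | cons b L => simp [PySem.Str.join, PySem.Chars.join, List.intercalate]


lemma pv_mul_lt {a b w r : Nat} (ha : a < b) (hr : r < w) : a * w + r < b * w := by
  calc a * w + r < a * w + w := by omega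
    _ = (a + 1) * w := (Nat.succ_mul a w).symm
    _ ≤ b * w := Nat.mul_le_mul_right w ha

lemma pv_lt_of_mul {a w r b : Nat} (h : a * w + r < b * w) : a < b := by
  by_contra hab
  have h2 : b * w ≤ a * w := Nat.mul_le_mul_right w (Nat.le_of_not_lt hab)
  omega

lemma pv_flatten_len {α : Type} (l : List (List α)) (w : Nat)
    (h : ∀ ch ∈ l, ch.length = w) : l.flatten.length = l.length * w := by
  induction l with
  | nil => simp
  | cons ch t ih =>
    have h1 : ch.length = w := h ch (by simp)
    have h2 : t.flatten.length = t.length * w := ih (fun c hc => h c (by simp [hc]))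
    simp [h1, h2, Nat.succ_mul, Nat.add_comm]

lemma pv_flatten_getD {α : Type} (l : List (List α)) (w i j : Nat) (d : α)
    (h : ∀ ch ∈ l, ch.length = w) (hi : i < l.length) (hj : j < w) :
    l.flatten.getD (i * w + j) d = (l.getD i []).getD j d := by
  induction l generalizing i with
  | nil => simp at hi
  | cons ch t ih =>
    have h1 : ch.length = w := h ch (by simp)
    cases i with
    | zero =>
      simp only [Nat.zero_mul, Nat.zero_add, List.flatten_cons, List.getD_cons_zero]
      rw [List.getD_append _ _ _ _ (by omega)]
    | succ i =>
      have harith : (i + 1) * w + j = ch.length + (i * w + j) := by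
        rw [h1, Nat.succ_mul]; ring
      simp only [List.flatten_cons, harith]
      rw [List.getD_append_right _ _ _ _ (by omega)]
      have : ch.length + (i * w + j) - ch.length = i * w + j := by omega
      rw [this]
      exact ih i (fun c hc => h c (by simp [hc])) (by simpa using hi)

lemma pv_cells_len (grid : List (List String)) (mN nN : Nat) :
    (pvCells grid mN nN).length = mN * nN := by
  unfold pvCells
  rw [pv_flatten_len _ nN (by intro ch hch; simp at hch; obtain ⟨r, hr, rfl⟩ := hch; simp)]
  simp

lemma pv_cellsT_len (grid : List (List String)) (mN nN : Nat) :
    (pvCellsT grid mN nN).length = nN * mN := by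
  unfold pvCellsT
  rw [pv_flatten_len _ mN (by intro ch hch; simp at hch; obtain ⟨c, hc, rfl⟩ := hch; simp)]
  simp

lemma pv_cells_getD (grid : List (List String)) (mN nN q r : Nat) (hq : q < mN) (hr : r < nN) :
    (pvCells grid mN nN).getD (q * nN + r) "" = (grid.getD q []).getD r "" := by
  unfold pvCells
  rw [pv_flatten_getD _ nN q r "" (by intro ch hch; simp at hch; obtain ⟨a, ha, rfl⟩ := hch; simp)
    (by simpa using hq) hr]
  rw [PySem.List.getD_map_range _ _ _ _ hq]
  rw [PySem.List.getD_map_range _ _ _ _ hr]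

lemma pv_cellsT_getD (grid : List (List String)) (mN nN q r : Nat) (hq : q < nN) (hr : r < mN) :
    (pvCellsT grid mN nN).getD (q * mN + r) "" = (grid.getD r []).getD q "" := by
  unfold pvCellsT
  rw [pv_flatten_getD _ mN q r "" (by intro ch hch; simp at hch; obtain ⟨a, ha, rfl⟩ := hch; simp)
    (by simpa using hq) hr]
  rw [PySem.List.getD_map_range _ _ _ _ hq]
  rw [PySem.List.getD_map_range _ _ _ _ hr]

-- a nested row/column loop is the flat loop over k with (k / nN, k % nN)
lemma pv_nest {β : Type} (G : β → Nat → Nat → β) (mN nN : Nat) (hn : 0 < nN) (init : β) :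
    (List.range mN).foldl (fun s r => (List.range nN).foldl (fun s c => G s r c) s) init
      = (List.range (mN * nN)).foldl (fun s k => G s (k / nN) (k % nN)) init := by
  induction mN with
  | zero => simp
  | succ m ih =>
    rw [List.range_succ, List.foldl_append, ih, Nat.succ_mul, List.range_add, List.foldl_append,
      List.foldl_map]
    simp only [List.foldl_cons, List.foldl_nil]
    apply PySem.List.foldl_congr_mem
    intro acc c hc
    have hc' : c < nN := List.mem_range.mp hc
    have h1 : (m * nN + c) / nN = m := by
      rw [Nat.mul_comm, Nat.mul_add_div hn, Nat.div_eq_of_lt hc', Nat.add_zero]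
    have h2 : (m * nN + c) % nN = c := by
      rw [Nat.mul_comm, Nat.mul_add_mod, Nat.mod_eq_of_lt hc']
    rw [h1, h2]

-- A's horizontal scan from (q, r) is the joined slice of the row-major flattening
lemma pv_hscan (grid : List (List String)) (mN nN : Nat)
    (hrows : ∀ row ∈ grid, nN ≤ row.length) (hm : mN = grid.length) :
    ∀ (fuel : Nat) (q r : Nat) (s : String), r < nN → q * nN + r < mN * nN →
    hScanA grid (mN : Int) (nN : Int) fuel s (q : Int) (r : Int)
      = s ++ PySem.Str.join "" (((pvCells grid mN nN).drop (q * nN + r)).take fuel) := by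
  intro fuel
  induction fuel with
  | zero => intro q r s hr hk; simp [hScanA, pv_join_nil]
  | succ f ih =>
    intro q r s hr hk
    have hq : q < mN := pv_lt_of_mul hk
    have hn : 0 < nN := by omega
    have hklen : q * nN + r < (pvCells grid mN nN).length := by
      rw [pv_cells_len]; exact hk
    have hdrop : (pvCells grid mN nN).drop (q * nN + r)
        = (pvCells grid mN nN).getD (q * nN + r) "" :: (pvCells grid mN nN).drop (q * nN + r + 1) := by
      rw [List.drop_eq_getElem_cons hklen, List.getD_eq_getElem _ _ hklen]
    rw [hdrop, List.take_succ_cons, pv_join_cons, pv_cells_getD grid mN nN q r hq hr]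
    simp only [hScanA]
    have c1 : ((r : Int) + 1 = (nN : Int)) = ((r + 1 : Nat) = nN) := by
      rw [eq_iff_iff]; constructor <;> intro hh <;> [exact_mod_cast hh; exact_mod_cast hh]
    have c2 : ((q : Int) + 1 = (mN : Int)) = ((q + 1 : Nat) = mN) := by
      rw [eq_iff_iff]; constructor <;> intro hh <;> [exact_mod_cast hh; exact_mod_cast hh]
    simp only [PySem.List.pyGetD_natCast, c1, c2]
    split_ifs with h1 h2
    · -- r+1 = nN, q+1 = mN : last cell of the grid, break
      have hend : q * nN + r + 1 = mN * nN := by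
        rw [← h2, Nat.succ_mul]; omega
      rw [show q * nN + r + 1 = (pvCells grid mN nN).length by rw [pv_cells_len]; exact hend]
      rw [List.drop_length]
      simp [pv_join_nil]
    · -- r+1 = nN, q+1 < mN : wrap to next row
      have hq1 : q + 1 < mN := by omega
      have hk1 : (q + 1) * nN + 0 < mN * nN := pv_mul_lt hq1 hn
      have hrec := ih (q + 1) 0 (s ++ (grid.getD q []).getD r "") hn hk1
      have hidx : (q + 1) * nN + 0 = q * nN + r + 1 := by
        rw [Nat.succ_mul]; omega
      rw [hidx] at hrec
      simp only [Nat.cast_add, Nat.cast_one, Nat.cast_zero] at hrec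
      rw [hrec, String.append_assoc]
    · -- same row
      have hr1 : r + 1 < nN := by omega
      have hk1 : q * nN + (r + 1) < mN * nN := pv_mul_lt hq hr1
      have hrec := ih q (r + 1) (s ++ (grid.getD q []).getD r "") hr1 hk1
      rw [show q * nN + (r + 1) = q * nN + r + 1 from by omega] at hrec
      simp only [Nat.cast_add, Nat.cast_one] at hrec
      rw [hrec, String.append_assoc]

lemma pv_vscan (grid : List (List String)) (mN nN : Nat)
    (hrows : ∀ row ∈ grid, nN ≤ row.length) (hm : mN = grid.length) :
    ∀ (fuel : Nat) (q r : Nat) (s : String), r < mN → q * mN + r < nN * mN →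
    vScanA grid (mN : Int) (nN : Int) fuel s (r : Int) (q : Int)
      = s ++ PySem.Str.join "" (((pvCellsT grid mN nN).drop (q * mN + r)).take fuel) := by
  intro fuel
  induction fuel with
  | zero => intro q r s hr hk; simp [vScanA, pv_join_nil]
  | succ f ih =>
    intro q r s hr hk
    have hq : q < nN := pv_lt_of_mul hk
    have hmpos : 0 < mN := by omega
    have hklen : q * mN + r < (pvCellsT grid mN nN).length := by
      rw [pv_cellsT_len]; exact hk
    have hdrop : (pvCellsT grid mN nN).drop (q * mN + r)
        = (pvCellsT grid mN nN).getD (q * mN + r) "" :: (pvCellsT grid mN nN).drop (q * mN + r + 1) := by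
      rw [List.drop_eq_getElem_cons hklen, List.getD_eq_getElem _ _ hklen]
    rw [hdrop, List.take_succ_cons, pv_join_cons, pv_cellsT_getD grid mN nN q r hq hr]
    simp only [vScanA]
    have c1 : ((r : Int) + 1 = (mN : Int)) = ((r + 1 : Nat) = mN) := by
      rw [eq_iff_iff]; constructor <;> intro hh <;> exact_mod_cast hh
    have c2 : ((q : Int) + 1 = (nN : Int)) = ((q + 1 : Nat) = nN) := by
      rw [eq_iff_iff]; constructor <;> intro hh <;> exact_mod_cast hh
    simp only [PySem.List.pyGetD_natCast, c1, c2]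
    split_ifs with h1 h2
    · have hend : q * mN + r + 1 = nN * mN := by
        rw [← h2, Nat.succ_mul]; omega
      rw [show q * mN + r + 1 = (pvCellsT grid mN nN).length by rw [pv_cellsT_len]; exact hend]
      rw [List.drop_length]
      simp [pv_join_nil]
    · have hq1 : q + 1 < nN := by omega
      have hk1 : (q + 1) * mN + 0 < nN * mN := pv_mul_lt hq1 hmpos
      have hrec := ih (q + 1) 0 (s ++ (grid.getD r []).getD q "") hmpos hk1
      have hidx : (q + 1) * mN + 0 = q * mN + r + 1 := by
        rw [Nat.succ_mul]; omega
      rw [hidx] at hrec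
      simp only [Nat.cast_add, Nat.cast_one, Nat.cast_zero] at hrec
      rw [hrec, String.append_assoc]
    · have hr1 : r + 1 < mN := by omega
      have hk1 : q * mN + (r + 1) < nN * mN := pv_mul_lt hq hr1
      have hrec := ih q (r + 1) (s ++ (grid.getD r []).getD q "") hr1 hk1
      rw [show q * mN + (r + 1) = q * mN + r + 1 from by omega] at hrec
      simp only [Nat.cast_add, Nat.cast_one] at hrec
      rw [hrec, String.append_assoc]

lemma pv_hmark (nN : Nat) (hn : 0 < nN) :
    ∀ (fuel : Nat) (q r : Nat) (st : PySem.Set (Int × Int)), r < nN →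
    hMarkA (nN : Int) fuel st (q : Int) (r : Int)
      = st.update ((List.range fuel).map (fun t =>
          ((((q * nN + r + t) / nN : Nat) : Int), (((q * nN + r + t) % nN : Nat) : Int)))) := by
  intro fuel
  induction fuel with
  | zero => intro q r st hr; simp [hMarkA, PySem.Set.update_nil]
  | succ f ih =>
    intro q r st hr
    have hd : (q * nN + r + 0) / nN = q := by
      rw [Nat.add_zero, Nat.mul_comm, Nat.mul_add_div hn, Nat.div_eq_of_lt hr, Nat.add_zero]
    have hmm : (q * nN + r + 0) % nN = r := by
      rw [Nat.add_zero, Nat.mul_comm, Nat.mul_add_mod, Nat.mod_eq_of_lt hr]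
    simp only [List.range_succ_eq_map, List.map_cons, List.map_map, PySem.Set.update_cons, hd, hmm]
    simp only [hMarkA]
    have c1 : ((r : Int) + 1 = (nN : Int)) = ((r + 1 : Nat) = nN) := by
      rw [eq_iff_iff]; constructor <;> intro hh <;> exact_mod_cast hh
    simp only [c1]
    split_ifs with h1
    · have hrec := ih (q + 1) 0 (st.add ((q : Int), (r : Int))) hn
      simp only [Nat.cast_add, Nat.cast_one, Nat.cast_zero] at hrec
      rw [hrec]
      congr 1
      apply List.map_congr_left
      intro t _
      have harith : (q + 1) * nN + 0 + t = q * nN + r + (t + 1) := by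
        rw [Nat.succ_mul]; omega
      simp only [Function.comp_apply, Nat.succ_eq_add_one]
      exact congrArg (fun x : Nat => (((x / nN : Nat) : Int), ((x % nN : Nat) : Int))) harith
    · have hrec := ih q (r + 1) (st.add ((q : Int), (r : Int))) (by omega)
      simp only [Nat.cast_add, Nat.cast_one] at hrec
      rw [hrec]
      congr 1
      apply List.map_congr_left
      intro t _
      have harith : q * nN + (r + 1) + t = q * nN + r + (t + 1) := by omega
      simp only [Function.comp_apply, Nat.succ_eq_add_one]
      exact congrArg (fun x : Nat => (((x / nN : Nat) : Int), ((x % nN : Nat) : Int))) harith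

lemma pv_vmark (mN : Nat) (hm : 0 < mN) :
    ∀ (fuel : Nat) (q r : Nat) (st : PySem.Set (Int × Int)), r < mN →
    vMarkA (mN : Int) fuel st (r : Int) (q : Int)
      = st.update ((List.range fuel).map (fun t =>
          ((((q * mN + r + t) % mN : Nat) : Int), (((q * mN + r + t) / mN : Nat) : Int)))) := by
  intro fuel
  induction fuel with
  | zero => intro q r st hr; simp [vMarkA, PySem.Set.update_nil]
  | succ f ih =>
    intro q r st hr
    have hd : (q * mN + r + 0) / mN = q := by
      rw [Nat.add_zero, Nat.mul_comm, Nat.mul_add_div hm, Nat.div_eq_of_lt hr, Nat.add_zero]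
    have hmm : (q * mN + r + 0) % mN = r := by
      rw [Nat.add_zero, Nat.mul_comm, Nat.mul_add_mod, Nat.mod_eq_of_lt hr]
    simp only [List.range_succ_eq_map, List.map_cons, List.map_map, PySem.Set.update_cons, hd, hmm]
    simp only [vMarkA]
    have c1 : ((r : Int) + 1 = (mN : Int)) = ((r + 1 : Nat) = mN) := by
      rw [eq_iff_iff]; constructor <;> intro hh <;> exact_mod_cast hh
    simp only [c1]
    split_ifs with h1
    · have hrec := ih (q + 1) 0 (st.add ((r : Int), (q : Int))) hm
      simp only [Nat.cast_add, Nat.cast_one, Nat.cast_zero] at hrec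
      rw [hrec]
      congr 1
      apply List.map_congr_left
      intro t _
      have harith : (q + 1) * mN + 0 + t = q * mN + r + (t + 1) := by
        rw [Nat.succ_mul]; omega
      simp only [Function.comp_apply, Nat.succ_eq_add_one]
      exact congrArg (fun x : Nat => (((x % mN : Nat) : Int), ((x / mN : Nat) : Int))) harith
    · have hrec := ih q (r + 1) (st.add ((r : Int), (q : Int))) (by omega)
      simp only [Nat.cast_add, Nat.cast_one] at hrec
      rw [hrec]
      congr 1
      apply List.map_congr_left
      intro t _
      have harith : q * mN + (r + 1) + t = q * mN + r + (t + 1) := by omega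
      simp only [Function.comp_apply, Nat.succ_eq_add_one]
      exact congrArg (fun x : Nat => (((x % mN : Nat) : Int), ((x / mN : Nat) : Int))) harith

-- counting members of s lying in t is the size of the intersection
lemma pv_count (s t : PySem.Set (Int × Int)) :
    s.foldl (fun cnt cell => if PySem.Set.contains t cell then cnt + 1 else cnt) 0
      = PySem.Set.len (PySem.Set.inter s t) := by
  rw [PySem.List.foldl_count_if (fun cell => PySem.Set.contains t cell) s 0]
  simp [PySem.Set.len, PySem.Set.inter, List.countP_eq_length_filter]


lemma pv_cellsB (grid : List (List String)) (mN nN : Nat) :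
    (PySem.List.pyRange 0 (mN : Int) 1).flatMap (fun r =>
      (PySem.List.pyRange 0 (nN : Int) 1).map (fun c =>
        PySem.List.pyGetD (PySem.List.pyGetD grid r []) c "")) = pvCells grid mN nN := by
  simp only [pvCells, PySem.List.pyRange_zero_natCast, List.flatMap_def, List.map_map]
  congr 1
  apply List.map_congr_left
  intro r _
  simp only [Function.comp_apply, List.map_map]
  apply List.map_congr_left
  intro c _
  simp

lemma pv_cellsTB (grid : List (List String)) (mN nN : Nat) :
    (PySem.List.pyRange 0 (nN : Int) 1).flatMap (fun c =>
      (PySem.List.pyRange 0 (mN : Int) 1).map (fun r =>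
        PySem.List.pyGetD (PySem.List.pyGetD grid r []) c "")) = pvCellsT grid mN nN := by
  simp only [pvCellsT, PySem.List.pyRange_zero_natCast, List.flatMap_def, List.map_map]
  congr 1
  apply List.map_congr_left
  intro c _
  simp only [Function.comp_apply, List.map_map]
  apply List.map_congr_left
  intro r _
  simp

lemma pv_horzA_eq (grid : List (List String)) (pattern : String) (mN nN pN : Nat)
    (hrows : ∀ row ∈ grid, nN ≤ row.length) (hm : mN = grid.length) (hn : 0 < nN)
    (hpat : pattern.toList.length = pN) :
    (PySem.List.pyRange 0 (mN : Int) 1).foldl (fun hs r =>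
      (PySem.List.pyRange 0 (nN : Int) 1).foldl (fun hs c =>
        if ((hScanA grid (mN : Int) (nN : Int) pN "" r c).toList.length : Int) = (pN : Int) ∧
            hScanA grid (mN : Int) (nN : Int) pN "" r c = pattern
        then hMarkA (nN : Int) pN hs r c else hs) hs) PySem.Set.empty
    = pvHset grid pattern mN nN pN := by
  simp only [PySem.List.pyRange_zero_natCast, List.foldl_map]
  rw [pv_nest (fun s rr cc =>
        if ((hScanA grid (mN : Int) (nN : Int) pN "" (rr : Int) (cc : Int)).toList.length : Int) = (pN : Int) ∧
            hScanA grid (mN : Int) (nN : Int) pN "" (rr : Int) (cc : Int) = pattern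
        then hMarkA (nN : Int) pN s (rr : Int) (cc : Int) else s) mN nN hn]
  unfold pvHset
  apply PySem.List.foldl_congr_mem
  intro acc k hk
  have hkN : k < mN * nN := List.mem_range.mp hk
  have hr : k % nN < nN := Nat.mod_lt _ hn
  have hqr : (k / nN) * nN + k % nN = k := by
    rw [Nat.mul_comm]; exact Nat.div_add_mod k nN
  rw [pv_hscan grid mN nN hrows hm pN (k / nN) (k % nN) "" hr (by rw [hqr]; exact hkN)]
  rw [pv_hmark nN hn pN (k / nN) (k % nN) acc hr]
  rw [hqr]
  rw [show ("" : String) ++ PySem.Str.join "" (List.take pN (List.drop k (pvCells grid mN nN)))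
      = PySem.Str.join "" (List.take pN (List.drop k (pvCells grid mN nN))) from by simp]
  apply if_congr _ rfl rfl
  constructor
  · exact fun hh => hh.2
  · intro hh
    refine ⟨?_, hh⟩
    rw [hh, hpat]

lemma pv_vertA_eq (grid : List (List String)) (pattern : String) (mN nN pN : Nat)
    (hrows : ∀ row ∈ grid, nN ≤ row.length) (hm : mN = grid.length) (hmp : 0 < mN)
    (hpat : pattern.toList.length = pN) :
    (PySem.List.pyRange 0 (nN : Int) 1).foldl (fun vs c =>
      (PySem.List.pyRange 0 (mN : Int) 1).foldl (fun vs r =>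
        if ((vScanA grid (mN : Int) (nN : Int) pN "" r c).toList.length : Int) = (pN : Int) ∧
            vScanA grid (mN : Int) (nN : Int) pN "" r c = pattern
        then vMarkA (mN : Int) pN vs r c else vs) vs) PySem.Set.empty
    = pvVset grid pattern mN nN pN := by
  simp only [PySem.List.pyRange_zero_natCast, List.foldl_map]
  rw [pv_nest (fun s cc rr =>
        if ((vScanA grid (mN : Int) (nN : Int) pN "" (rr : Int) (cc : Int)).toList.length : Int) = (pN : Int) ∧
            vScanA grid (mN : Int) (nN : Int) pN "" (rr : Int) (cc : Int) = pattern
        then vMarkA (mN : Int) pN s (rr : Int) (cc : Int) else s) nN mN hmp]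
  unfold pvVset
  apply PySem.List.foldl_congr_mem
  intro acc k hk
  have hkN : k < nN * mN := List.mem_range.mp hk
  have hr : k % mN < mN := Nat.mod_lt _ hmp
  have hqr : (k / mN) * mN + k % mN = k := by
    rw [Nat.mul_comm]; exact Nat.div_add_mod k mN
  rw [pv_vscan grid mN nN hrows hm pN (k / mN) (k % mN) "" hr (by rw [hqr]; exact hkN)]
  rw [pv_vmark mN hmp pN (k / mN) (k % mN) acc hr]
  rw [hqr]
  rw [show ("" : String) ++ PySem.Str.join "" (List.take pN (List.drop k (pvCellsT grid mN nN)))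
      = PySem.Str.join "" (List.take pN (List.drop k (pvCellsT grid mN nN))) from by simp]
  apply if_congr _ rfl rfl
  constructor
  · exact fun hh => hh.2
  · intro hh
    refine ⟨?_, hh⟩
    rw [hh, hpat]

lemma pv_hB_eq (grid : List (List String)) (pattern : String) (mN nN pN : Nat) :
    (PySem.List.pyRange 0 ((mN : Int) * (nN : Int)) 1).foldl (fun h k =>
      if PySem.Str.join "" (PySem.List.slice (pvCells grid mN nN) (some k) (some (k + (pN : Int)))) = pattern then
        h.update ((PySem.List.pyRange 0 (pN : Int) 1).map (fun t =>
          (PySem.Int.floordiv (k + t) (nN : Int), PySem.Int.mod (k + t) (nN : Int))))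
      else h) PySem.Set.empty
    = pvHset grid pattern mN nN pN := by
  rw [show ((mN : Int) * (nN : Int)) = ((mN * nN : Nat) : Int) from by push_cast; ring]
  simp only [PySem.List.pyRange_zero_natCast, List.foldl_map, List.map_map]
  unfold pvHset
  apply PySem.List.foldl_congr_mem
  intro acc k _
  rw [PySem.List.slice_natCast_add]
  apply if_congr Iff.rfl _ rfl
  congr 1
  apply List.map_congr_left
  intro t _
  simp only [Function.comp_apply]
  rw [show ((k : Int) + (t : Int)) = ((k + t : Nat) : Int) from by push_cast; ring,
    PySem.Int.floordiv_natCast, PySem.Int.mod_natCast]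

lemma pv_vB_eq (grid : List (List String)) (pattern : String) (mN nN pN : Nat) :
    (PySem.List.pyRange 0 ((mN : Int) * (nN : Int)) 1).foldl (fun v k =>
      if PySem.Str.join "" (PySem.List.slice (pvCellsT grid mN nN) (some k) (some (k + (pN : Int)))) = pattern then
        v.update ((PySem.List.pyRange k (k + (pN : Int)) 1).map (fun j =>
          (PySem.Int.mod j (mN : Int), PySem.Int.floordiv j (mN : Int))))
      else v) PySem.Set.empty
    = pvVset grid pattern mN nN pN := by
  rw [show ((mN : Int) * (nN : Int)) = ((nN * mN : Nat) : Int) from by push_cast; ring]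
  simp only [PySem.List.pyRange_zero_natCast, List.foldl_map, List.map_map]
  unfold pvVset
  apply PySem.List.foldl_congr_mem
  intro acc k _
  rw [PySem.List.slice_natCast_add]
  apply if_congr Iff.rfl _ rfl
  congr 1
  rw [PySem.List.pyRange_one]
  rw [show ((k : Int) + (pN : Int) - (k : Int)) = ((pN : Nat) : Int) from by ring]
  rw [Int.toNat_natCast, List.map_map]
  apply List.map_congr_left
  intro t _
  simp only [Function.comp_apply]
  rw [show ((k : Int) + (t : Int)) = ((k + t : Nat) : Int) from by push_cast; ring,
    PySem.Int.floordiv_natCast, PySem.Int.mod_natCast]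

-- ===== VERDICT (by name: the statement is the Claim_ definition above) =====
theorem countCells_spec : Claim_equal_countCells := by
  intro grid pattern hdom hpre
  unfold Spec_countCells countCells countCells_alt
  obtain ⟨hne, hpre2⟩ := hpre
  simp only [PySem.List.pyGetD_zero, PySem.Str.len_eq, Int.toNat_natCast]
  by_cases hp0 : pattern.toList.length = 0
  · -- empty pattern: both sides are 0
    simp [hp0, hScanA, hMarkA, vScanA, vMarkA, List.foldl_fixed, PySem.Set.empty]
  by_cases hn0 : (grid.getD 0 []).length = 0
  · -- empty first row: no loop iterations on either side
    have hc : ((grid.getD 0 []).length : Int) = 0 ∨ ((pattern.toList.length : Nat) : Int) = 0 :=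
      Or.inl (by exact_mod_cast hn0)
    rw [if_pos hc]
    have h0 : PySem.List.pyRange 0 (((grid.getD 0 []).length : Nat) : Int) 1 = [] := by
      rw [hn0]
      simp [PySem.List.pyRange_one_eq_nil]
    simp only [h0, List.foldl_nil, List.foldl_fixed]
    rfl
  -- main case
  have hn : 0 < (grid.getD 0 []).length := Nat.pos_of_ne_zero hn0
  have hmp : 0 < grid.length := List.length_pos_iff.mpr hne
  have hpatne : pattern ≠ "" := by
    intro hh
    rw [hh] at hp0
    exact hp0 rfl
  have hrows : ∀ row ∈ grid, (grid.getD 0 []).length ≤ row.length := by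
    intro row hrow
    have hh := hpre2 hpatne row hrow
    have hhead : grid.headD [] = grid.getD 0 [] := by cases grid <;> rfl
    rwa [hhead] at hh
  rw [if_neg (by push_cast; omega :
    ¬(((grid.getD 0 []).length : Int) = 0 ∨ ((pattern.toList.length : Nat) : Int) = 0))]
  rw [pv_cellsB grid grid.length (grid.getD 0 []).length,
    pv_cellsTB grid grid.length (grid.getD 0 []).length]
  rw [pv_horzA_eq grid pattern grid.length (grid.getD 0 []).length pattern.toList.length hrows rfl hn rfl,
    pv_vertA_eq grid pattern grid.length (grid.getD 0 []).length pattern.toList.length hrows rfl hmp rfl,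
    pv_hB_eq grid pattern grid.length (grid.getD 0 []).length pattern.toList.length,
    pv_vB_eq grid pattern grid.length (grid.getD 0 []).length pattern.toList.length,
    pv_count]
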